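-- pv_equiv track=rewrite | github.com/dodsoneatwit/ToxicityDetectionLLMThesis | lib/preprocess/algorithms.py | check_repetition
-- ===== SOURCE A (Python) =====
-- from collections import Counter
--
-- def check_repetition(text):
--   """Counts the number of repeated words in a string."""
--
--   words = text.lower().split()
--   word_counts = Counter(words)
--   repeated_words = {word: count for word, count in word_counts.items() if count > 1}
--   for value in repeated_words:
--     if repeated_words[value] >= 25:
--       return True
--   return False
-- ===== SOURCE B (Python) =====
-- def check_repetition(text):
--   """Counts the number of repeated words in a string."""
--   counts = {}
--   for word in text.lower().split():
--     c = counts.get(word, 0) + 1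
--     if c >= 25:
--       return True
--     counts[word] = c
--   return False
-- ===== Notes on version B (the rewrite author's own statement) =====
-- stated objective: simpler
-- what changed: Single early-terminating pass that maintains running counts and returns True the moment a word's count reaches 25, instead of Counter-ing everything, building a dict of repeated words and then scanning it.
import Mathlib
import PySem

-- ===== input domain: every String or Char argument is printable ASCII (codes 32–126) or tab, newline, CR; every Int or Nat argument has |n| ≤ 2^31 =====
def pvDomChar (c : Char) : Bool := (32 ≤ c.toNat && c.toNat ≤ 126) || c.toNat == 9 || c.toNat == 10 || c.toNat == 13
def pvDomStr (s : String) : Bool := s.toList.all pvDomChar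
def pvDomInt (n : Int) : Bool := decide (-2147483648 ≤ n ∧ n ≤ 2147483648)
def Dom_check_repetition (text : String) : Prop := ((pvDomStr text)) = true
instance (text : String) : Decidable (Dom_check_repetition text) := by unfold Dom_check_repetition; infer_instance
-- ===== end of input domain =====

-- B replaces A's Counter-then-scan structure by one early-terminating counting pass (objective: simpler).


-- ===== PORT A =====
-- words = text.lower().split(); word_counts = Counter(words);
-- repeated_words = {w: c for w, c in word_counts.items() if c > 1};
-- for value in repeated_words: if repeated_words[value] >= 25: return True
-- return False
-- (repeated_words[value] is ported as getD _ _ 0; the key is always present, so no KeyError is hidden)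
def check_repetition (text : String) : Bool :=
  let words := PySem.Str.split₀ (PySem.Str.lower text)
  let word_counts := PySem.Dict.counter words
  let repeated_words := PySem.Dict.ofList (word_counts.items.filter (fun p => 1 < p.2))
  (PySem.Dict.keys repeated_words).any (fun value => 25 ≤ PySem.Dict.getD repeated_words value 0)

-- ===== PORT B =====
-- single pass: running counts in a dict, return True as soon as a word's count reaches 25
def crAltLoop : List String → PySem.Dict String Int → Bool
  | [], _ => false
  | w :: ws, counts =>
    let c := PySem.Dict.getD counts w 0 + 1
    if 25 ≤ c then true else crAltLoop ws (counts.insert w c)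

def check_repetition_alt (text : String) : Bool :=
  crAltLoop (PySem.Str.split₀ (PySem.Str.lower text)) PySem.Dict.empty

-- ===== PRECONDITION & SPEC =====
def Spec_check_repetition (text : String) (out : Bool) : Prop := out = check_repetition_alt text
instance (text : String) (out : Bool) : Decidable (Spec_check_repetition text out) := by unfold Spec_check_repetition; infer_instance

-- ===== CLAIM (what is proved, stated in full; the proofs are below) =====
def Claim_equal_check_repetition : Prop := ∀ (text : String), Dom_check_repetition text → Spec_check_repetition text (check_repetition text)

-- ===== LEMMAS AND PROOFS =====


theorem crUpdate_items (ps : List (String × Int)) :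
    ∀ (d : PySem.Dict String Int), (ps.map Prod.fst).Nodup →
    (∀ k ∈ ps.map Prod.fst, d.contains k = false) →
    (d.update ps).items = d.items ++ ps := by
  induction ps with
  | nil => intro d _ _; simp [PySem.Dict.update]
  | cons p ps ih =>
    intro d hnd hfr
    rw [List.map_cons] at hnd
    have hfr0 : d.contains p.1 = false := hfr p.1 (by simp)
    have hstep : d.update (p :: ps) = (d.insert p.1 p.2).update ps := by
      simp [PySem.Dict.update]
    rw [hstep, ih]
    · rw [PySem.Dict.items_insert_of_not_contains _ _ hfr0]
      simp
    · exact (List.nodup_cons.mp hnd).2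
    · intro k hk
      have hne : k ≠ p.1 := by
        intro he; subst he; exact (List.nodup_cons.mp hnd).1 hk
      rw [PySem.Dict.contains_insert]
      have h1 : (k == p.1) = false := by simp [hne]
      rw [h1]
      simpa using hfr k (by simp [hk])

theorem crA_iff (words : List String) :
    ((fun words =>
      let word_counts := PySem.Dict.counter words
      let repeated_words := PySem.Dict.ofList (word_counts.items.filter (fun p => 1 < p.2))
      (PySem.Dict.keys repeated_words).any (fun value => 25 ≤ PySem.Dict.getD repeated_words value 0)) words) = true
    ↔ ∃ w ∈ words, 25 ≤ (words.count w : Int) := by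
  simp only []
  set cnt : String → Int := fun k => (words.count k : Int) with hcnt
  set S := PySem.Set.ofList words with hS
  have hfst : ∀ l : List String, (l.map (fun k => (k, cnt k))).map Prod.fst = l := by
    intro l; rw [List.map_map]; exact List.map_id _
  have hps : (PySem.Dict.counter words).items.filter (fun p => 1 < p.2)
      = (S.filter (fun k => 1 < cnt k)).map (fun k => (k, cnt k)) := by
    rw [PySem.Dict.items_counter, List.filter_map]
    rfl
  have hnodup : (((S.filter (fun k => 1 < cnt k)).map (fun k => (k, cnt k))).map Prod.fst).Nodup := by
    rw [hfst]
    exact (PySem.Set.nodup_ofList words).filter _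
  have hitems2 : (PySem.Dict.ofList ((PySem.Dict.counter words).items.filter (fun p => 1 < p.2))).items
      = (S.filter (fun k => 1 < cnt k)).map (fun k => (k, cnt k)) := by
    rw [hps]
    unfold PySem.Dict.ofList
    rw [crUpdate_items _ _ hnodup (by intro k _; exact PySem.Dict.contains_empty k)]
    rfl
  have hkeys : (PySem.Dict.keys (PySem.Dict.ofList ((PySem.Dict.counter words).items.filter (fun p => 1 < p.2))))
      = S.filter (fun k => 1 < cnt k) := by
    rw [PySem.Dict.keys, hitems2, hfst]
  have hget : ∀ k ∈ S.filter (fun k => 1 < cnt k),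
      PySem.Dict.getD (PySem.Dict.ofList ((PySem.Dict.counter words).items.filter (fun p => 1 < p.2))) k (0:Int) = cnt k := by
    intro k hk
    apply PySem.Dict.getD_of_mem_items
    · rw [hitems2]; exact List.mem_map_of_mem hk
    · rw [PySem.Dict.keys, hitems2]; exact hnodup
  rw [List.any_eq_true]
  constructor
  · rintro ⟨x, hx, hge⟩
    rw [hkeys] at hx
    rw [hget x hx] at hge
    refine ⟨x, (PySem.Set.mem_ofList _ _).mp (List.mem_of_mem_filter hx), ?_⟩
    exact of_decide_eq_true hge
  · rintro ⟨x, hx, hge⟩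
    have hxS : x ∈ S.filter (fun k => 1 < cnt k) := by
      rw [List.mem_filter]
      refine ⟨(PySem.Set.mem_ofList _ _).mpr hx, ?_⟩
      have : 1 ≤ words.count x := List.one_le_count_iff.mpr hx
      simp only [hcnt]
      simp only [decide_eq_true_eq]
      omega
    refine ⟨x, by rw [hkeys]; exact hxS, ?_⟩
    rw [hget x hxS]
    exact decide_eq_true hge

theorem crLoop_iff (ws : List String) :
    ∀ (d : PySem.Dict String Int), (∀ w, PySem.Dict.getD d w 0 < 25) →
    (crAltLoop ws d = true ↔ ∃ w ∈ ws, 25 ≤ PySem.Dict.getD d w 0 + (ws.count w : Int)) := by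
  induction ws with
  | nil => intro d hd; simp [crAltLoop]
  | cons w ws ih =>
    intro d hd
    simp only [crAltLoop]
    by_cases hc : (25 : Int) ≤ PySem.Dict.getD d w 0 + 1
    · rw [if_pos hc]
      simp only [true_iff]
      refine ⟨w, List.mem_cons_self, ?_⟩
      have h1 : List.count w (w :: ws) = List.count w ws + 1 := List.count_cons_self ..
      rw [h1]; push_cast; omega
    · rw [if_neg hc]
      have hd' : ∀ w', PySem.Dict.getD (d.insert w (PySem.Dict.getD d w 0 + 1)) w' 0 < 25 := by
        intro w'
        by_cases h : w' = w
        · subst h; rw [PySem.Dict.getD_insert_self]; omega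
        · rw [PySem.Dict.getD_insert_of_ne _ _ _ h]; exact hd w'
      rw [ih _ hd']
      constructor
      · rintro ⟨x, hx, h25⟩
        refine ⟨x, List.mem_cons_of_mem _ hx, ?_⟩
        by_cases h : x = w
        · subst h
          rw [PySem.Dict.getD_insert_self] at h25
          have h1 : List.count x (x :: ws) = List.count x ws + 1 := List.count_cons_self ..
          rw [h1]; push_cast; omega
        · rw [PySem.Dict.getD_insert_of_ne _ _ _ h] at h25
          have h1 : List.count x (w :: ws) = List.count x ws := by
            rw [List.count_cons_of_ne (Ne.symm h)]
          rw [h1]; exact h25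
      · rintro ⟨x, hx, h25⟩
        by_cases h : x = w
        · subst h
          have h1 : List.count x (x :: ws) = List.count x ws + 1 := List.count_cons_self ..
          rw [h1] at h25; push_cast at h25
          have hmem : x ∈ ws := by
            by_contra hnm
            rw [List.count_eq_zero.mpr hnm] at h25; omega
          refine ⟨x, hmem, ?_⟩
          rw [PySem.Dict.getD_insert_self]; omega
        · have hmem : x ∈ ws := (List.mem_cons.mp hx).resolve_left h
          refine ⟨x, hmem, ?_⟩
          rw [PySem.Dict.getD_insert_of_ne _ _ _ h]
          rw [List.count_cons_of_ne (Ne.symm h)] at h25; exact h25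

-- ===== VERDICT (by name: the statement is the Claim_ definition above) =====
theorem check_repetition_spec : Claim_equal_check_repetition := by
  intro text _
  unfold Spec_check_repetition check_repetition check_repetition_alt
  set words := PySem.Str.split₀ (PySem.Str.lower text) with hw
  have hA := crA_iff words
  have hB := crLoop_iff words PySem.Dict.empty (by intro w; simp [PySem.Dict.getD_empty])
  simp only [PySem.Dict.getD_empty] at hB
  simp only [] at hA
  rw [Bool.eq_iff_iff, hA, hB]
  simp
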